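-- pv_equiv track=rewrite | github.com/barandenizkorkmaz/bogazici-university-undergraduate-projects | CMPE493/Project3/queryUtils.py | checkSetIntersections
-- ===== SOURCE A (Python) =====
-- def checkSetIntersections(corpus: dict, key = 'DESC') -> dict:
--     intersectionDict = dict()
--     for urlSrc in corpus:
--         intersectionDict[urlSrc] = dict()
--         descSetSrc = set(corpus[urlSrc][key])
--         for urlTarget in corpus:
--             if urlSrc != urlTarget:
--                 descSetTarget = set(corpus[urlTarget][key])
--                 intersectionSet = descSetSrc.intersection(descSetTarget)
--                 intersectionDict[urlSrc][urlTarget] = len(intersectionSet)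
--     return intersectionDict
-- ===== SOURCE B (Python) =====
-- def checkSetIntersections(corpus: dict, key = 'DESC') -> dict:
--     # Triangular symmetric fill: token sets are built once per url, each unordered
--     # pair's intersection size is computed once and stored in both directions.
--     sets = {url: set(doc[key]) for url, doc in corpus.items()}
--     intersectionDict = {url: {} for url in corpus}
--     pending = list(corpus)
--     while pending:
--         urlSrc = pending.pop(0)
--         setSrc = sets[urlSrc]
--         for urlTarget in pending:
--             count = len(setSrc & sets[urlTarget])
--             intersectionDict[urlSrc][urlTarget] = count
--             intersectionDict[urlTarget][urlSrc] = count
--     return intersectionDict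
-- ===== Notes on version B (the rewrite author's own statement) =====
-- stated objective: faster
-- what changed: B builds each url's token set once in a single pass and fills the symmetric matrix by a triangular traversal of unordered pairs (computing each intersection once and storing it in both directions), instead of A's full ordered double loop that rebuilds the target token set and recomputes every intersection in both orders.
import Mathlib
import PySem

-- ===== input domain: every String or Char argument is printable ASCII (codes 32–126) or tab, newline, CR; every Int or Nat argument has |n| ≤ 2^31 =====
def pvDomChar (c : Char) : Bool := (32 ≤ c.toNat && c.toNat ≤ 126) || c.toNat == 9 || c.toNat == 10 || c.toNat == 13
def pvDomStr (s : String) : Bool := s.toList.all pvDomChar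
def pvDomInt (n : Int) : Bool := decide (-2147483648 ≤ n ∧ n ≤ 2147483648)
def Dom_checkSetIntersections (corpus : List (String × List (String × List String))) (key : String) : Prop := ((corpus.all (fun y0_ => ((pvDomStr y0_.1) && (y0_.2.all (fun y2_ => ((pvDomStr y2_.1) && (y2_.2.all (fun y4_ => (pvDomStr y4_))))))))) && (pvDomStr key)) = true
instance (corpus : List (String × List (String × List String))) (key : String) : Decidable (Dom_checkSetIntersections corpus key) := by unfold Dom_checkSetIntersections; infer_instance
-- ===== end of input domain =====

-- B replaces A's full ordered double loop (which rebuilds each target token set inside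
-- the inner loop and computes every intersection twice) by a one-pass token-set table
-- plus a triangular traversal of unordered pairs that stores each intersection size in
-- both directions; the return value is proved identical.

-- ===== PORT A =====
def checkSetIntersections (corpus : List (String × List (String × List String))) (key : String) : List (String × List (String × Int)) :=
  let corpusD := PySem.Dict.ofList corpus
  let intersectionDict :=
    corpusD.keys.foldl (fun acc urlSrc =>
      let acc := acc.insert urlSrc (PySem.Dict.empty : PySem.Dict String Int)
      let descSetSrc := PySem.Set.ofList ((PySem.Dict.ofList (corpusD.getD urlSrc [])).getD key [])
      corpusD.keys.foldl (fun acc urlTarget =>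
        if urlSrc ≠ urlTarget then
          acc.modify urlSrc PySem.Dict.empty (fun d => d.insert urlTarget
            (PySem.Set.len (PySem.Set.inter descSetSrc
              (PySem.Set.ofList ((PySem.Dict.ofList (corpusD.getD urlTarget [])).getD key [])))))
        else acc) acc) PySem.Dict.empty
  intersectionDict.items.map (fun p => (p.1, p.2.items))

-- ===== PORT B =====
-- the 'while pending: urlSrc = pending.pop(0); for urlTarget in pending: …' loop of Source B
def pvFill (sets : PySem.Dict String (PySem.Set String)) (pending : List String)
    (res : PySem.Dict String (PySem.Dict String Int)) : PySem.Dict String (PySem.Dict String Int) :=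
  match pending with
  | [] => res
  | urlSrc :: pending =>
    let setSrc := sets.getD urlSrc []
    pvFill sets pending (pending.foldl (fun res urlTarget =>
      (res.modify urlSrc PySem.Dict.empty
          (fun d => d.insert urlTarget (PySem.Set.len (PySem.Set.inter setSrc (sets.getD urlTarget []))))).modify urlTarget
        PySem.Dict.empty
          (fun d => d.insert urlSrc (PySem.Set.len (PySem.Set.inter setSrc (sets.getD urlTarget []))))) res)

def checkSetIntersections_alt (corpus : List (String × List (String × List String))) (key : String) : List (String × List (String × Int)) :=
  let corpusD := PySem.Dict.ofList corpus
  let sets := corpusD.items.foldl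
    (fun s p => s.insert p.1 (PySem.Set.ofList ((PySem.Dict.ofList p.2).getD key []))) PySem.Dict.empty
  let res := corpusD.keys.foldl
    (fun r u => r.insert u (PySem.Dict.empty : PySem.Dict String Int)) PySem.Dict.empty
  (pvFill sets corpusD.keys res).items.map (fun p => (p.1, p.2.items))

-- ===== PRECONDITION & SPEC =====
-- Pre_ excludes exactly the inputs where Python A raises KeyError: some document of
-- the corpus (after Python-dict duplicate-key resolution) has no entry for `key`.
def Pre_checkSetIntersections (corpus : List (String × List (String × List String))) (key : String) : Prop :=
  ∀ p ∈ (PySem.Dict.ofList corpus).items, (PySem.Dict.ofList p.2).contains key = true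
instance (corpus : List (String × List (String × List String))) (key : String) : Decidable (Pre_checkSetIntersections corpus key) := by unfold Pre_checkSetIntersections; infer_instance

def pvWitness_checkSetIntersections : (List (String × List (String × List String))) × String :=
  ([("a", [("DESC", ["x", "y"])]), ("b", [("DESC", ["y"])])], "DESC")

def Spec_checkSetIntersections (corpus : List (String × List (String × List String))) (key : String) (out : List (String × List (String × Int))) : Prop := out = checkSetIntersections_alt corpus key
instance (corpus : List (String × List (String × List String))) (key : String) (out : List (String × List (String × Int))) : Decidable (Spec_checkSetIntersections corpus key out) := by unfold Spec_checkSetIntersections; infer_instance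

-- ===== CLAIM (what is proved, stated in full; the proofs are below) =====
def Claim_equal_checkSetIntersections : Prop := ∀ (corpus : List (String × List (String × List String))) (key : String), Dom_checkSetIntersections corpus key → Pre_checkSetIntersections corpus key → Spec_checkSetIntersections corpus key (checkSetIntersections corpus key)

-- ===== LEMMAS AND PROOFS =====

-- intersection count read off B's `sets` table
def pvCnt (sets : PySem.Dict String (PySem.Set String)) (u v : String) : Int :=
  PySem.Set.len (PySem.Set.inter (sets.getD u []) (sets.getD v []))

-- lookup in a dict built by inserting a value computed from each key
lemma pv_getD_foldl_insert {ν : Type} (l : List String) (g : String → ν) (s0 : PySem.Dict String ν)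
    (dflt : ν) (u : String) :
    (l.foldl (fun s k => s.insert k (g k)) s0).getD u dflt
      = if u ∈ l then g u else s0.getD u dflt := by
  induction l generalizing s0 with
  | nil => simp
  | cons k l ih =>
    simp only [List.foldl_cons, ih, List.mem_cons]
    by_cases hl : u ∈ l
    · simp [hl]
    · by_cases hk : u = k
      · simp [hk, PySem.Dict.getD_insert_self]
      · simp [hk, hl, PySem.Dict.getD_insert_of_ne _ _ _ hk]

lemma pv_len_inter_comm (a b : List String) (ha : a.Nodup) (hb : b.Nodup) :
    PySem.Set.len (PySem.Set.inter a b) = PySem.Set.len (PySem.Set.inter b a) := by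
  have hperm : (PySem.Set.inter a b).Perm (PySem.Set.inter b a) := by
    rw [List.perm_ext_iff_of_nodup (PySem.Set.nodup_inter _ _ ha) (PySem.Set.nodup_inter _ _ hb)]
    intro x
    simp only [PySem.Set.mem_inter]
    tauto
  simp [PySem.Set.len, hperm.length_eq]

-- ----- A-side: collapse of the nested dict-mutation loops -----

lemma pv_foldl_skip {σ : Type} (u : String) (l : List String) (f : σ → String → σ) (d : σ) :
    l.foldl (fun d v => if u ≠ v then f d v else d) d = (l.filter (fun v => u != v)).foldl f d := by
  induction l generalizing d with
  | nil => rfl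
  | cons v l ih =>
    rw [List.foldl_cons, List.filter_cons]
    by_cases h : u = v
    · rw [if_neg (by simp [h]), if_neg (by simp [h]), ih]
    · rw [if_pos h, if_pos (by simp [bne_iff_ne, h]), List.foldl_cons, ih]

lemma pvA_inner (l : List String) (u : String) (c : String → Int)
    (acc : PySem.Dict String (PySem.Dict String Int)) (d0 : PySem.Dict String Int) :
    l.foldl (fun a v => if u ≠ v then a.modify u PySem.Dict.empty (fun d => d.insert v (c v)) else a)
        (acc.insert u d0)
      = acc.insert u (l.foldl (fun d v => if u ≠ v then d.insert v (c v) else d) d0) := by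
  induction l generalizing d0 with
  | nil => rfl
  | cons v l ih =>
    rw [List.foldl_cons, List.foldl_cons]
    by_cases h : u = v
    · rw [if_neg (by simp [h]), if_neg (by simp [h]), ih]
    · rw [if_pos h, if_pos h]
      rw [PySem.Dict.modify, PySem.Dict.getD_insert_self, PySem.Dict.insert_insert_self, ih]

lemma pvA_items (urls : List String) (c : String → String → Int) (hnd : urls.Nodup) :
    (urls.foldl (fun acc u =>
        urls.foldl (fun a v => if u ≠ v then a.modify u PySem.Dict.empty (fun d => d.insert v (c u v)) else a)
          (acc.insert u PySem.Dict.empty)) PySem.Dict.empty).items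
      = urls.map (fun u => (u,
          (urls.filter (fun v => u != v)).foldl (fun d v => d.insert v (c u v)) PySem.Dict.empty)) := by
  have hfun : (fun (acc : PySem.Dict String (PySem.Dict String Int)) u =>
      urls.foldl (fun a v => if u ≠ v then a.modify u PySem.Dict.empty (fun d => d.insert v (c u v)) else a)
        (acc.insert u PySem.Dict.empty))
      = (fun acc u => acc.insert u
          ((urls.filter (fun v => u != v)).foldl (fun d v => d.insert v (c u v)) PySem.Dict.empty)) := by
    funext acc u
    rw [pvA_inner, pv_foldl_skip u urls (fun d v => d.insert v (c u v)) PySem.Dict.empty]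
  rw [hfun]
  rw [PySem.Dict.items_foldl_insert_fresh urls (fun u => u)
      (fun u => (urls.filter (fun v => u != v)).foldl (fun d v => d.insert v (c u v)) PySem.Dict.empty)
      PySem.Dict.empty (fun a _ => PySem.Dict.contains_empty a) (by simpa using hnd)]
  simp [show (PySem.Dict.empty : PySem.Dict String (PySem.Dict String Int)).items = [] from rfl]

-- items of a row dict built by two fresh insert folds
lemma pv_row_items (pre post : List String) (f g : String → Int)
    (hnd : (pre ++ post).Nodup) :
    (post.foldl (fun d v => d.insert v (g v))
        (pre.foldl (fun d x => d.insert x (f x)) (PySem.Dict.empty : PySem.Dict String Int))).items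
      = pre.map (fun x => (x, f x)) ++ post.map (fun v => (v, g v)) := by
  rcases List.nodup_append.mp hnd with ⟨hpre, hpost, hdisj⟩
  have h1 := PySem.Dict.items_foldl_insert_fresh pre (fun x => x) f
    (PySem.Dict.empty : PySem.Dict String Int) (fun a _ => PySem.Dict.contains_empty a) (by simpa using hpre)
  have hkeys : (pre.foldl (fun d x => d.insert x (f x)) (PySem.Dict.empty : PySem.Dict String Int)).keys = pre := by
    rw [show (fun (d : PySem.Dict String Int) x => d.insert x (f x))
        = (fun (d : PySem.Dict String Int) x => d.insert x ((fun (_ : PySem.Dict String Int) y => f y) d x)) from rfl,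
      PySem.Dict.keys_foldl_insert, PySem.Dict.keys_empty, PySem.Set.update_nil_left,
      PySem.Set.ofList_eq_self_of_nodup _ hpre]
  have h2 := PySem.Dict.items_foldl_insert_fresh post (fun v => v) g
    (pre.foldl (fun d x => d.insert x (f x)) (PySem.Dict.empty : PySem.Dict String Int))
    (fun v hv => by
      rw [← Bool.not_eq_true, PySem.Dict.contains_iff_mem_keys, hkeys]
      exact fun hmem => hdisj v hmem v hv rfl)
    (by simpa using hpost)
  simpa [h1] using h2

lemma pv_filter_split (pre post : List String) (w : String) (hpre : w ∉ pre) (hpost : w ∉ post) :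
    (pre ++ w :: post).filter (fun v => w != v) = pre ++ post := by
  rw [List.filter_append, List.filter_cons]
  have h1 : pre.filter (fun v => w != v) = pre :=
    List.filter_eq_self.mpr (fun a ha => by simp [bne_iff_ne]; exact fun h => hpre (h ▸ ha))
  have h2 : post.filter (fun v => w != v) = post :=
    List.filter_eq_self.mpr (fun a ha => by simp [bne_iff_ne]; exact fun h => hpost (h ▸ ha))
  simp [h1, h2]

-- ----- B-side: effect of the pair-filling loop on a single row -----

lemma pvB_inner_self (sets : PySem.Dict String (PySem.Set String)) (u : String) (vs : List String)
    (res : PySem.Dict String (PySem.Dict String Int)) (hu : u ∉ vs) :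
    (vs.foldl (fun res v =>
        (res.modify u PySem.Dict.empty
            (fun d => d.insert v (PySem.Set.len (PySem.Set.inter (sets.getD u []) (sets.getD v []))))).modify v
          PySem.Dict.empty
            (fun d => d.insert u (PySem.Set.len (PySem.Set.inter (sets.getD u []) (sets.getD v []))))) res).getD u PySem.Dict.empty
      = vs.foldl (fun d v => d.insert v (pvCnt sets u v)) (res.getD u PySem.Dict.empty) := by
  induction vs generalizing res with
  | nil => rfl
  | cons v vs ih =>
    simp only [List.mem_cons, not_or] at hu
    rw [List.foldl_cons, ih _ hu.2, List.foldl_cons]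
    congr 1
    simp only [PySem.Dict.modify, pvCnt]
    rw [PySem.Dict.getD_insert_of_ne _ _ _ hu.1, PySem.Dict.getD_insert_self]

lemma pvB_inner_other (sets : PySem.Dict String (PySem.Set String)) (u w : String) (vs : List String)
    (res : PySem.Dict String (PySem.Dict String Int)) (hw : w ≠ u) (hvs : w ∉ vs) :
    (vs.foldl (fun res v =>
        (res.modify u PySem.Dict.empty
            (fun d => d.insert v (PySem.Set.len (PySem.Set.inter (sets.getD u []) (sets.getD v []))))).modify v
          PySem.Dict.empty
            (fun d => d.insert u (PySem.Set.len (PySem.Set.inter (sets.getD u []) (sets.getD v []))))) res).getD w PySem.Dict.empty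
      = res.getD w PySem.Dict.empty := by
  induction vs generalizing res with
  | nil => rfl
  | cons v vs ih =>
    simp only [List.mem_cons, not_or] at hvs
    rw [List.foldl_cons, ih _ hvs.2]
    simp only [PySem.Dict.modify]
    rw [PySem.Dict.getD_insert_of_ne _ _ _ hvs.1, PySem.Dict.getD_insert_of_ne _ _ _ hw]

lemma pvB_inner_hit (sets : PySem.Dict String (PySem.Set String)) (u w : String) (a b : List String)
    (res : PySem.Dict String (PySem.Dict String Int)) (hw : w ≠ u) (ha : w ∉ a) (hb : w ∉ b) :
    ((a ++ w :: b).foldl (fun res v =>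
        (res.modify u PySem.Dict.empty
            (fun d => d.insert v (PySem.Set.len (PySem.Set.inter (sets.getD u []) (sets.getD v []))))).modify v
          PySem.Dict.empty
            (fun d => d.insert u (PySem.Set.len (PySem.Set.inter (sets.getD u []) (sets.getD v []))))) res).getD w PySem.Dict.empty
      = (res.getD w PySem.Dict.empty).insert u (pvCnt sets u w) := by
  rw [List.foldl_append, List.foldl_cons, pvB_inner_other sets u w b _ hw hb]
  have hA := pvB_inner_other sets u w a res hw ha
  simp only [PySem.Dict.modify, pvCnt] at hA ⊢
  rw [PySem.Dict.getD_insert_self, PySem.Dict.getD_insert_of_ne _ _ _ hw, hA]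

lemma pvB_inner_keys (sets : PySem.Dict String (PySem.Set String)) (u : String) (vs : List String)
    (res : PySem.Dict String (PySem.Dict String Int)) (hu : u ∈ res.keys) (hvs : ∀ v ∈ vs, v ∈ res.keys) :
    (vs.foldl (fun res v =>
        (res.modify u PySem.Dict.empty
            (fun d => d.insert v (PySem.Set.len (PySem.Set.inter (sets.getD u []) (sets.getD v []))))).modify v
          PySem.Dict.empty
            (fun d => d.insert u (PySem.Set.len (PySem.Set.inter (sets.getD u []) (sets.getD v []))))) res).keys
      = res.keys := by
  induction vs generalizing res with
  | nil => rfl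
  | cons v vs ih =>
    rw [List.foldl_cons]
    have hstep : ((res.modify u PySem.Dict.empty
        (fun d => d.insert v (PySem.Set.len (PySem.Set.inter (sets.getD u []) (sets.getD v []))))).modify v
          PySem.Dict.empty
        (fun d => d.insert u (PySem.Set.len (PySem.Set.inter (sets.getD u []) (sets.getD v []))))).keys = res.keys := by
      simp only [PySem.Dict.modify]
      rw [PySem.Dict.keys_insert_of_contains, PySem.Dict.keys_insert_of_contains]
      · exact (PySem.Dict.contains_iff_mem_keys _ _).mpr hu
      · rw [PySem.Dict.contains_iff_mem_keys, PySem.Dict.keys_insert_of_contains _ _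
          ((PySem.Dict.contains_iff_mem_keys _ _).mpr hu)]
        exact hvs v (by simp)
    rw [ih _ (by rw [hstep]; exact hu) (fun x hx => by rw [hstep]; exact hvs x (by simp [hx])), hstep]

lemma pvFill_keys (sets : PySem.Dict String (PySem.Set String)) (pending : List String)
    (res : PySem.Dict String (PySem.Dict String Int)) (h : ∀ x ∈ pending, x ∈ res.keys) :
    (pvFill sets pending res).keys = res.keys := by
  induction pending generalizing res with
  | nil => rfl
  | cons u p ih =>
    rw [pvFill]
    have hstep := pvB_inner_keys sets u p res (h u (by simp)) (fun v hv => h v (by simp [hv]))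
    rw [ih _ (fun x hx => by rw [hstep]; exact h x (by simp [hx])), hstep]

lemma pvFill_notmem (sets : PySem.Dict String (PySem.Set String)) (pending : List String)
    (res : PySem.Dict String (PySem.Dict String Int)) (w : String) (hw : w ∉ pending) :
    (pvFill sets pending res).getD w PySem.Dict.empty = res.getD w PySem.Dict.empty := by
  induction pending generalizing res with
  | nil => rfl
  | cons u p ih =>
    simp only [List.mem_cons, not_or] at hw
    rw [pvFill, ih _ hw.2, pvB_inner_other sets u w p res hw.1 hw.2]

lemma pvFill_main (sets : PySem.Dict String (PySem.Set String)) (pre post : List String) (w : String)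
    (res : PySem.Dict String (PySem.Dict String Int)) (hnd : (pre ++ w :: post).Nodup) :
    (pvFill sets (pre ++ w :: post) res).getD w PySem.Dict.empty
      = post.foldl (fun d v => d.insert v (pvCnt sets w v))
          (pre.foldl (fun d x => d.insert x (pvCnt sets x w)) (res.getD w PySem.Dict.empty)) := by
  induction pre generalizing res with
  | nil =>
    simp only [List.nil_append, List.nodup_cons] at hnd
    rw [List.nil_append, pvFill, List.foldl_nil,
      pvFill_notmem sets post _ w hnd.1, pvB_inner_self sets w post res hnd.1]
  | cons x pre ih =>
    have hnd' : (pre ++ w :: post).Nodup := (List.nodup_cons.mp hnd).2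
    have hx : x ∉ pre ++ w :: post := (List.nodup_cons.mp hnd).1
    have hwx : w ≠ x := by
      intro h; exact hx (by simp [h])
    have hwpre : w ∉ pre := by
      intro h
      rcases List.nodup_append.mp hnd' with ⟨_, _, hdisj⟩
      exact hdisj w h w (by simp) rfl
    have hwpost : w ∉ post := by
      rcases List.nodup_append.mp hnd' with ⟨_, hc, _⟩
      exact (List.nodup_cons.mp hc).1
    rw [List.cons_append, pvFill, ih _ hnd', List.foldl_cons]
    rw [pvB_inner_hit sets x w pre post res hwx hwpre hwpost]

-- B's `sets` table agrees with A's inline token sets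
lemma pv_sets_getD (corpus : List (String × List (String × List String))) (key u : String) :
    ((PySem.Dict.ofList corpus).items.foldl
        (fun s p => s.insert p.1 (PySem.Set.ofList ((PySem.Dict.ofList p.2).getD key []))) PySem.Dict.empty).getD u []
      = if u ∈ (PySem.Dict.ofList corpus).keys
          then PySem.Set.ofList ((PySem.Dict.ofList ((PySem.Dict.ofList corpus).getD u [])).getD key [])
          else [] := by
  rw [PySem.Dict.items_eq_map_keys (PySem.Dict.ofList corpus) (PySem.Dict.nodup_keys_ofList corpus) [],
    List.foldl_map]
  rw [show (fun (s : PySem.Dict String (PySem.Set String)) (k : String) =>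
        s.insert k (PySem.Set.ofList ((PySem.Dict.ofList ((PySem.Dict.ofList corpus).getD k [])).getD key [])))
      = (fun s k => s.insert k ((fun k => PySem.Set.ofList
          ((PySem.Dict.ofList ((PySem.Dict.ofList corpus).getD k [])).getD key [])) k)) from rfl,
    pv_getD_foldl_insert]
  split <;> simp [PySem.Dict.getD_empty]

-- ===== VERDICT (by name: the statement is the Claim_ definition above) =====
theorem checkSetIntersections_spec : Claim_equal_checkSetIntersections := by
  intro corpus key _hdom _hpre
  unfold Spec_checkSetIntersections
  simp only [checkSetIntersections, checkSetIntersections_alt]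
  have hnd : (PySem.Dict.ofList corpus).keys.Nodup := PySem.Dict.nodup_keys_ofList corpus
  rw [pvA_items (PySem.Dict.ofList corpus).keys
    (fun u v => PySem.Set.len (PySem.Set.inter
      (PySem.Set.ofList ((PySem.Dict.ofList ((PySem.Dict.ofList corpus).getD u [])).getD key []))
      (PySem.Set.ofList ((PySem.Dict.ofList ((PySem.Dict.ofList corpus).getD v [])).getD key [])))) hnd]
  -- B side: keys of the result dict are the urls
  have hres0keys : ((PySem.Dict.ofList corpus).keys.foldl
      (fun r u => r.insert u (PySem.Dict.empty : PySem.Dict String Int)) PySem.Dict.empty).keys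
      = (PySem.Dict.ofList corpus).keys := by
    rw [show (fun (r : PySem.Dict String (PySem.Dict String Int)) (u : String) =>
          r.insert u (PySem.Dict.empty : PySem.Dict String Int))
        = (fun r u => r.insert u ((fun (_ : PySem.Dict String (PySem.Dict String Int)) (_ : String) =>
            (PySem.Dict.empty : PySem.Dict String Int)) r u)) from rfl,
      PySem.Dict.keys_foldl_insert, PySem.Dict.keys_empty, PySem.Set.update_nil_left,
      PySem.Set.ofList_eq_self_of_nodup _ hnd]
  have hFkeys : (pvFill
      ((PySem.Dict.ofList corpus).items.foldl
        (fun s p => s.insert p.1 (PySem.Set.ofList ((PySem.Dict.ofList p.2).getD key []))) PySem.Dict.empty)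
      (PySem.Dict.ofList corpus).keys
      ((PySem.Dict.ofList corpus).keys.foldl
        (fun r u => r.insert u (PySem.Dict.empty : PySem.Dict String Int)) PySem.Dict.empty)).keys
      = (PySem.Dict.ofList corpus).keys := by
    rw [pvFill_keys _ _ _ (fun x hx => by rw [hres0keys]; exact hx), hres0keys]
  rw [PySem.Dict.items_eq_map_keys _ (by rw [hFkeys]; exact hnd) PySem.Dict.empty, hFkeys]
  rw [List.map_map, List.map_map]
  apply List.map_congr_left
  intro w hw
  simp only [Function.comp]
  obtain ⟨pre, post, hsplit⟩ := List.append_of_mem hw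
  have hnd' : (pre ++ w :: post).Nodup := by rw [← hsplit]; exact hnd
  have hwpre : w ∉ pre := by
    rcases List.nodup_append.mp hnd' with ⟨_, _, hdisj⟩
    exact fun h => hdisj w h w (by simp) rfl
  have hwpost : w ∉ post := by
    rcases List.nodup_append.mp hnd' with ⟨_, hc, _⟩
    exact (List.nodup_cons.mp hc).1
  have hnd2 : (pre ++ post).Nodup := by
    rcases List.nodup_append.mp hnd' with ⟨hp, hc, hd⟩
    exact List.nodup_append.mpr ⟨hp, (List.nodup_cons.mp hc).2,
      fun a ha b hb => hd a ha b (List.mem_cons_of_mem _ hb)⟩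
  rw [hsplit]
  rw [pvFill_main _ pre post w _ hnd']
  have hres0getD : ((pre ++ w :: post).foldl
      (fun r u => r.insert u (PySem.Dict.empty : PySem.Dict String Int)) PySem.Dict.empty).getD w PySem.Dict.empty
      = PySem.Dict.empty := by
    rw [show (fun (r : PySem.Dict String (PySem.Dict String Int)) (u : String) =>
          r.insert u (PySem.Dict.empty : PySem.Dict String Int))
        = (fun r u => r.insert u ((fun (_ : String) => (PySem.Dict.empty : PySem.Dict String Int)) u)) from rfl,
      pv_getD_foldl_insert]
    split <;> simp [PySem.Dict.getD_empty]
  rw [hres0getD]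
  rw [pv_row_items pre post _ _ hnd2]
  rw [pv_filter_split pre post w hwpre hwpost, List.foldl_append]
  rw [pv_row_items pre post _ _ hnd2]
  have hmem : ∀ x, x ∈ pre ++ w :: post → x ∈ (PySem.Dict.ofList corpus).keys := by
    rw [hsplit]; exact fun x h => h
  refine congrArg (Prod.mk w) (congrArg₂ (· ++ ·) (List.map_congr_left ?_) (List.map_congr_left ?_))
  · intro x hx
    have hxk : x ∈ (PySem.Dict.ofList corpus).keys := hmem x (by simp [hx])
    have hwk : w ∈ (PySem.Dict.ofList corpus).keys := hmem w (by simp)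
    simp only [pvCnt, pv_sets_getD, if_pos hxk, if_pos hwk]
    rw [pv_len_inter_comm _ _ (PySem.Set.nodup_ofList _) (PySem.Set.nodup_ofList _)]
  · intro v hv
    have hvk : v ∈ (PySem.Dict.ofList corpus).keys := hmem v (by simp [hv])
    have hwk : w ∈ (PySem.Dict.ofList corpus).keys := hmem w (by simp)
    simp only [pvCnt, pv_sets_getD, if_pos hvk, if_pos hwk]
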